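-- pv_equiv track=rewrite | github.com/ndaly111/PolymarketAlerts | weather/scripts/post_forecast_distribution_discord.py | _join_blocks_with_limit
-- ===== SOURCE A (Python) =====
-- from typing import Dict, List, Optional, Tuple
--
-- def _truncate(s: str, max_len: int = 1900) -> str:
--     s = (s or "").strip()
--     if len(s) <= max_len:
--         return s
--     return s[: max_len - 20].rstrip() + "\n\n...(truncated)"
--
-- def _join_blocks_with_limit(blocks: List[str], limit: int = 1990) -> str:
--     out: List[str] = []
--     used = 0
--     sep = "\n\n"
--     for b in blocks:
--         b = (b or "").strip()
--         if not b:
--             continue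
--         add = b if not out else (sep + b)
--         if used + len(add) > limit:
--             break
--         out.append(b)
--         used += len(add)
--     if not out:
--         return ""
--     txt = sep.join(out).strip()
--     return txt if len(txt) <= limit else _truncate(txt, max_len=limit)
-- ===== SOURCE B (Python) =====
-- def _join_blocks_with_limit(blocks, limit=1990):
--     # Phase 1: clean once. Phase 2: cumulative joined lengths; count the fitting prefix. Phase 3: join.
--     cleaned = [s for b in blocks if (s := (b or "").strip())]
--     totals = []
--     t = 0
--     for s in cleaned:
--         t += len(s) + 2
--         totals.append(t)
--     # totals is strictly increasing, so the fitting indices form a prefix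
--     k = sum(1 for t in totals if t - 2 <= limit)
--     return "\n\n".join(cleaned[:k])
-- ===== Notes on version B (the rewrite author's own statement) =====
-- stated objective: alternative
-- what changed: A interleaves cleaning, separator bookkeeping and the cutoff in one stateful greedy loop with a break; B decomposes the task into three passes: clean the blocks once, compute the cumulative joined lengths, count the fitting prefix, and join a slice.
import Mathlib
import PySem

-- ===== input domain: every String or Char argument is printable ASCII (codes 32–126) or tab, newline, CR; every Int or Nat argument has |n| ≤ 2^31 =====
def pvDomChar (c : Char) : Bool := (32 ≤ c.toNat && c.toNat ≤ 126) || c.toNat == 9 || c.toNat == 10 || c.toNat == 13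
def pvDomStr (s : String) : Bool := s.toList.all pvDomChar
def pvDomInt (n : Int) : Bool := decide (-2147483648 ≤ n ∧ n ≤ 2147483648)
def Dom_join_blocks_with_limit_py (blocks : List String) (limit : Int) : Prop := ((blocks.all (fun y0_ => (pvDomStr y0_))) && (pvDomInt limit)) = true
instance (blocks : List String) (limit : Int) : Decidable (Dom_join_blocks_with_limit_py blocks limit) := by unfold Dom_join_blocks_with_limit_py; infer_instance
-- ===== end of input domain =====

-- B replaces A's single stateful greedy loop (clean + separator bookkeeping + break) by three
-- passes: clean once, cumulative joined lengths, count the fitting prefix, join a slice. Same cost.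

-- ===== PORT A =====
-- port of _truncate (A calls it on the final text)
def pv_truncate (s : String) (max_len : Int) : String :=
  let s1 := PySem.Str.strip s
  if PySem.Str.len s1 ≤ max_len then s1
  else PySem.Str.rstrip (PySem.Str.slice s1 none (some (max_len - 20))) ++ "\n\n...(truncated)"

-- A's for-loop: state (out, used); returning `out` at the length test is the `break`
def pv_aloop (limit : Int) : List String → List String → Int → List String
  | [], out, _ => out
  | b :: rest, out, used =>
    let b' := PySem.Str.strip b
    if b' = "" then pv_aloop limit rest out used
    else
      let add : String := if out.isEmpty then b' else "\n\n" ++ b'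
      if used + PySem.Str.len add > limit then out
      else pv_aloop limit rest (out ++ [b']) (used + PySem.Str.len add)

def join_blocks_with_limit_py (blocks : List String) (limit : Int) : String :=
  let out := pv_aloop limit blocks [] 0
  if out.isEmpty then ""
  else
    let txt := PySem.Str.strip (PySem.Str.join "\n\n" out)
    if PySem.Str.len txt ≤ limit then txt else pv_truncate txt limit

-- ===== PORT B =====
-- cleaned = [s for b in blocks if (s := (b or "").strip())]
def pv_cleaned (blocks : List String) : List String :=
  blocks.filterMap (fun b => let s := PySem.Str.strip b; if s = "" then none else some s)

-- the cumulative-sum loop building `totals`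
def pv_totals (cleaned : List String) : List Int :=
  (cleaned.foldl (fun (p : List Int × Int) s =>
    let t := p.2 + PySem.Str.len s + 2; (p.1 ++ [t], t)) ([], 0)).1

def join_blocks_with_limit_py_alt (blocks : List String) (limit : Int) : String :=
  let cleaned := pv_cleaned blocks
  let totals := pv_totals cleaned
  let k : Nat := (totals.filter (fun t => decide (t - 2 ≤ limit))).length
  PySem.Str.join "\n\n" (PySem.List.slice cleaned none (some (k : Int)))

-- ===== PRECONDITION & SPEC =====
def Spec_join_blocks_with_limit_py (blocks : List String) (limit : Int) (out : String) : Prop := out = join_blocks_with_limit_py_alt blocks limit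
instance (blocks : List String) (limit : Int) (out : String) : Decidable (Spec_join_blocks_with_limit_py blocks limit out) := by unfold Spec_join_blocks_with_limit_py; infer_instance

-- ===== CLAIM (what is proved, stated in full; the proofs are below) =====
def Claim_equal_join_blocks_with_limit_py : Prop := ∀ (blocks : List String) (limit : Int), Dom_join_blocks_with_limit_py blocks limit → Spec_join_blocks_with_limit_py blocks limit (join_blocks_with_limit_py blocks limit)

-- ===== LEMMAS AND PROOFS =====

-- the totals list produced from a running sum `acc`
def pvTotalsFrom : List String → Int → List Int
  | [], _ => []
  | s :: r, acc => (acc + PySem.Str.len s + 2) :: pvTotalsFrom r (acc + PySem.Str.len s + 2)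

-- the length of the fitting prefix, as a recursion
def pvKcount : List String → Int → Int → Nat
  | [], _, _ => 0
  | s :: r, acc, limit =>
    if acc + PySem.Str.len s ≤ limit then 1 + pvKcount r (acc + PySem.Str.len s + 2) limit else 0

theorem pv_totals_spec (l : List String) : ∀ (ts : List Int) (acc : Int),
    (l.foldl (fun (p : List Int × Int) s =>
      let t := p.2 + PySem.Str.len s + 2; (p.1 ++ [t], t)) (ts, acc)).1
      = ts ++ pvTotalsFrom l acc := by
  induction l with
  | nil => intro ts acc; simp [pvTotalsFrom]
  | cons s r ih =>
      intro ts acc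
      simp only [List.foldl_cons, pvTotalsFrom]
      rw [ih]
      simp

theorem pv_totals_mono (l : List String) : ∀ (acc x : Int), x ∈ pvTotalsFrom l acc → acc ≤ x := by
  induction l with
  | nil => intro acc x h; simp [pvTotalsFrom] at h
  | cons s r ih =>
      intro acc x h
      have hlen : (0 : Int) ≤ PySem.Str.len s := by
        rw [PySem.Str.len_eq]; exact_mod_cast Nat.zero_le _
      simp only [pvTotalsFrom, List.mem_cons] at h
      rcases h with h | h
      · omega
      · have := ih _ _ h; omega

theorem pv_filter_kcount (limit : Int) (l : List String) : ∀ (acc : Int),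
    ((pvTotalsFrom l acc).filter (fun t => decide (t - 2 ≤ limit))).length
      = pvKcount l acc limit := by
  induction l with
  | nil => intro acc; simp [pvTotalsFrom, pvKcount]
  | cons s r ih =>
      intro acc
      simp only [pvTotalsFrom, pvKcount, List.filter_cons]
      by_cases h : acc + PySem.Str.len s ≤ limit
      · rw [decide_eq_true_eq.mpr (by omega : acc + PySem.Str.len s + 2 - 2 ≤ limit)]
        rw [if_pos h]
        simp only [if_true, List.length_cons]
        rw [ih]
        omega
      · rw [decide_eq_false_iff_not.mpr (by omega : ¬ acc + PySem.Str.len s + 2 - 2 ≤ limit)]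
        have hnil : (pvTotalsFrom r (acc + PySem.Str.len s + 2)).filter
            (fun t => decide (t - 2 ≤ limit)) = [] := by
          rw [List.filter_eq_nil_iff]
          intro x hx
          have := pv_totals_mono r _ x hx
          simp only [decide_eq_true_eq]
          omega
        rw [if_neg h, if_neg (by simp)]
        rw [hnil]
        simp

theorem pv_len_sep_append (b : String) :
    PySem.Str.len ("\n\n" ++ b) = 2 + PySem.Str.len b := by
  simp only [PySem.Str.len_eq, String.toList_append]
  have : ("\n\n" : String).toList = ['\n', '\n'] := rfl
  rw [this]
  simp
  omega

-- pv_cleaned unfolds on cons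
theorem pv_cleaned_cons (b : String) (rest : List String) :
    pv_cleaned (b :: rest) =
      (if PySem.Str.strip b = "" then pv_cleaned rest
       else PySem.Str.strip b :: pv_cleaned rest) := by
  simp only [pv_cleaned, List.filterMap_cons]
  split_ifs with h <;> simp

-- nonempty phase of A's loop
theorem pv_aloop_ne (limit : Int) (l : List String) : ∀ (out : List String) (used : Int),
    out ≠ [] →
    pv_aloop limit l out used
      = out ++ (pv_cleaned l).take (pvKcount (pv_cleaned l) (used + 2) limit) := by
  induction l with
  | nil => intro out used _; simp [pv_aloop, pv_cleaned, pvKcount]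
  | cons b rest ih =>
      intro out used hout
      rw [pv_cleaned_cons]
      by_cases hb : PySem.Str.strip b = ""
      · simp only [pv_aloop, hb, if_pos rfl, if_pos hb]
        exact ih out used hout
      · have hie : out.isEmpty = false := by simp [List.isEmpty_iff, hout]
        simp only [pv_aloop, if_neg hb, hie, Bool.false_eq_true, if_false]
        rw [pv_len_sep_append]
        by_cases hc : used + (2 + PySem.Str.len (PySem.Str.strip b)) > limit
        · rw [if_pos hc]
          simp only [pvKcount]
          rw [if_neg (by omega)]
          simp
        · rw [if_neg hc]
          rw [ih (out ++ [PySem.Str.strip b]) _ (by simp)]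
          simp only [pvKcount]
          rw [if_pos (by omega)]
          have : used + (2 + PySem.Str.len (PySem.Str.strip b)) + 2
              = used + 2 + PySem.Str.len (PySem.Str.strip b) + 2 := by omega
          rw [this, Nat.add_comm 1 _, List.take_succ_cons]
          simp

-- empty phase (first block carries no separator)
theorem pv_aloop_nil (limit : Int) (l : List String) :
    pv_aloop limit l [] 0
      = (pv_cleaned l).take (pvKcount (pv_cleaned l) 0 limit) := by
  induction l with
  | nil => simp [pv_aloop, pv_cleaned, pvKcount]
  | cons b rest ih =>
      rw [pv_cleaned_cons]
      by_cases hb : PySem.Str.strip b = ""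
      · simp only [pv_aloop, if_pos hb]
        exact ih
      · simp only [pv_aloop, if_neg hb, List.isEmpty_nil, ite_true]
        by_cases hc : 0 + PySem.Str.len (PySem.Str.strip b) > limit
        · rw [if_pos hc]
          simp only [pvKcount]
          rw [if_neg (by omega)]
          simp
        · rw [if_neg hc]
          rw [List.nil_append, pv_aloop_ne limit rest [PySem.Str.strip b] _ (by simp)]
          simp only [pvKcount]
          rw [if_pos (by omega)]
          rw [Nat.add_comm 1 _, List.take_succ_cons]
          simp

-- goodC: nonempty, no whitespace at either end
def pvGoodC (l : List Char) : Prop :=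
  l ≠ [] ∧ (∀ c, l.head? = some c → PySem.Chars.isspace c = false)
    ∧ (∀ c, l.getLast? = some c → PySem.Chars.isspace c = false)

theorem pv_strip_good (cs : List Char) (h : PySem.Chars.strip cs ≠ []) :
    pvGoodC (PySem.Chars.strip cs) := by
  refine ⟨h, ?_, ?_⟩
  · intro c hc
    have hpre : PySem.Chars.strip cs <+: PySem.Chars.lstrip cs := by
      simp only [PySem.Chars.strip, PySem.Chars.rstrip]
      have hsuf : (PySem.Chars.lstrip cs).reverse.dropWhile PySem.Chars.isspace
          <:+ (PySem.Chars.lstrip cs).reverse := List.dropWhile_suffix _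
      exact List.reverse_suffix.mp (by simpa using hsuf)
    obtain ⟨t, ht⟩ := hpre
    have hhead : (cs.dropWhile PySem.Chars.isspace).head? = some c := by
      have h2 : (PySem.Chars.lstrip cs).head? = some c := by
        rw [← ht, List.head?_append_of_ne_nil _ h, hc]
      simpa [PySem.Chars.lstrip] using h2
    have hkey := List.head?_dropWhile_not PySem.Chars.isspace cs
    rw [hhead] at hkey
    exact hkey
  · intro c hc
    have hc' : ((PySem.Chars.lstrip cs).reverse.dropWhile PySem.Chars.isspace).head? = some c := by
      have h2 : (PySem.Chars.strip cs).getLast?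
          = ((PySem.Chars.lstrip cs).reverse.dropWhile PySem.Chars.isspace).head? := by
        simp only [PySem.Chars.strip, PySem.Chars.rstrip, List.getLast?_reverse]
      rw [← h2, hc]
    have hkey := List.head?_dropWhile_not PySem.Chars.isspace (PySem.Chars.lstrip cs).reverse
    rw [hc'] at hkey
    exact hkey

theorem pv_strip_fix (l : List Char) (h : pvGoodC l) : PySem.Chars.strip l = l := by
  obtain ⟨hne, hh, hl⟩ := h
  have hls : PySem.Chars.lstrip l = l := by
    cases l with
    | nil => rfl
    | cons a t =>
        have ha := hh a (by simp)
        simp [PySem.Chars.lstrip, List.dropWhile_cons, ha]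
  simp only [PySem.Chars.strip, hls, PySem.Chars.rstrip]
  cases hr : l.reverse with
  | nil => exact absurd (by simpa using hr) hne
  | cons x xs =>
      have hx : l.getLast? = some x := by rw [← List.head?_reverse, hr]; rfl
      have hxs := hl x hx
      rw [List.dropWhile_cons, hxs]
      simp only [Bool.false_eq_true, if_false]
      rw [← hr, List.reverse_reverse]

theorem pv_join_good (sep : List Char) : ∀ (parts : List (List Char)), parts ≠ [] →
    (∀ p ∈ parts, pvGoodC p) → pvGoodC (PySem.Chars.join sep parts) := by
  intro parts
  induction parts with
  | nil => intro h; simp at h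
  | cons p ps ih =>
      intro _ hall
      have hp : pvGoodC p := hall p (by simp)
      cases ps with
      | nil => simpa [PySem.Chars.join_singleton] using hp
      | cons q qs =>
          have hrest : pvGoodC (PySem.Chars.join sep (q :: qs)) := by
            apply ih (by simp)
            intro x hx; exact hall x (by simp [hx])
          rw [PySem.Chars.join_cons_cons]
          obtain ⟨hne, hh, hl⟩ := hp
          obtain ⟨hne', hh', hl'⟩ := hrest
          refine ⟨by simp [hne], ?_, ?_⟩
          · intro c hc
            rw [List.append_assoc, List.head?_append_of_ne_nil _ hne] at hc
            exact hh c hc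
          · intro c hc
            obtain ⟨d, hd⟩ := Option.isSome_iff_exists.mp (List.getLast?_isSome.mpr hne')
            have h1 : (sep ++ PySem.Chars.join sep (q :: qs)).getLast? = some d := by
              rw [List.getLast?_append, hd]; rfl
            have h2 : (p ++ sep ++ PySem.Chars.join sep (q :: qs)).getLast? = some d := by
              rw [List.append_assoc, List.getLast?_append, h1]; rfl
            rw [h2] at hc
            cases hc
            exact hl' _ hd

-- length of a "\n\n"-join, cons-cons step
theorem pv_jlen_cons_cons (a b : String) (rest : List String) :
    PySem.Str.len (PySem.Str.join "\n\n" (a :: b :: rest))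
      = PySem.Str.len a + 2 + PySem.Str.len (PySem.Str.join "\n\n" (b :: rest)) := by
  simp only [PySem.Str.len_eq, PySem.Str.toList_join, List.map_cons]
  rw [PySem.Chars.join_cons_cons]
  have : ("\n\n" : String).toList = ['\n', '\n'] := rfl
  rw [this]
  simp
  omega

theorem pv_jlen_singleton (a : String) :
    PySem.Str.len (PySem.Str.join "\n\n" [a]) = PySem.Str.len a := by
  simp only [PySem.Str.len_eq, PySem.Str.toList_join, List.map_cons, List.map_nil]
  rw [PySem.Chars.join_singleton]

-- the kept prefix fits within the limit
theorem pv_take_fits (limit : Int) (l : List String) : ∀ acc,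
    0 < pvKcount l acc limit →
    acc + PySem.Str.len (PySem.Str.join "\n\n" (l.take (pvKcount l acc limit))) ≤ limit := by
  induction l with
  | nil => intro acc h; simp [pvKcount] at h
  | cons s r ih =>
      intro acc hpos
      simp only [pvKcount] at hpos ⊢
      by_cases hc : acc + PySem.Str.len s ≤ limit
      · rw [if_pos hc]
        rw [Nat.add_comm 1 _, List.take_succ_cons]
        by_cases hk : 0 < pvKcount r (acc + PySem.Str.len s + 2) limit
        · have hrne : r.take (pvKcount r (acc + PySem.Str.len s + 2) limit) ≠ [] := by
            rw [Ne, List.take_eq_nil_iff]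
            push_neg
            constructor
            · omega
            · intro hr
              rw [hr] at hk; simp [pvKcount] at hk
          obtain ⟨x, xs, hx⟩ := List.exists_cons_of_ne_nil hrne
          rw [hx, pv_jlen_cons_cons]
          have hih := ih (acc + PySem.Str.len s + 2) hk
          rw [hx] at hih
          omega
        · have hk0 : pvKcount r (acc + PySem.Str.len s + 2) limit = 0 := by omega
          rw [hk0, List.take_zero, pv_jlen_singleton]
          omega
      · rw [if_neg hc] at hpos
        omega

-- ===== VERDICT (by name: the statement is the Claim_ definition above) =====
theorem join_blocks_with_limit_py_spec : Claim_equal_join_blocks_with_limit_py := by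
  intro blocks limit _
  unfold Spec_join_blocks_with_limit_py
  unfold join_blocks_with_limit_py join_blocks_with_limit_py_alt
  simp only []
  set cleaned := pv_cleaned blocks with hcl
  set k := pvKcount cleaned 0 limit with hk
  have hkfilter : ((pv_totals cleaned).filter (fun t => decide (t - 2 ≤ limit))).length = k := by
    rw [pv_totals, pv_totals_spec]
    simpa using pv_filter_kcount limit cleaned 0
  have hslice : PySem.List.slice cleaned none (some ((((pv_totals cleaned).filter
      (fun t => decide (t - 2 ≤ limit))).length : Nat) : Int)) = cleaned.take k := by
    rw [PySem.List.slice_to _ (by positivity)]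
    rw [hkfilter]
    simp
  rw [hslice, pv_aloop_nil]
  rw [← hcl, ← hk]
  by_cases hout : cleaned.take k = []
  · rw [if_pos (List.isEmpty_iff.mpr hout)]
    rw [hout]
    rfl
  · rw [if_neg (by simp [List.isEmpty_iff, hout])]
    -- all kept parts are good (stripped and nonempty)
    have hgood : ∀ p ∈ (cleaned.take k).map String.toList, pvGoodC p := by
      intro p hp
      simp only [List.mem_map] at hp
      obtain ⟨s, hs, rfl⟩ := hp
      have hscl : s ∈ cleaned := List.take_subset _ _ hs
      rw [hcl] at hscl
      simp only [pv_cleaned, List.mem_filterMap] at hscl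
      obtain ⟨b, _, hb⟩ := hscl
      by_cases hbe : PySem.Str.strip b = ""
      · simp [hbe] at hb
      · simp only [if_neg hbe] at hb
        cases hb
        have : PySem.Chars.strip b.toList ≠ [] := by
          rw [← PySem.Str.toList_strip]
          intro hcon
          apply hbe
          rw [← String.toList_inj]
          simpa using hcon
        have := pv_strip_good b.toList this
        rwa [← PySem.Str.toList_strip] at this
    have hjg : pvGoodC (PySem.Chars.join ("\n\n" : String).toList
        ((cleaned.take k).map String.toList)) := by
      apply pv_join_good
      · simpa using hout
      · exact hgood
    have htxt : PySem.Str.strip (PySem.Str.join "\n\n" (cleaned.take k))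
        = PySem.Str.join "\n\n" (cleaned.take k) := by
      rw [← String.toList_inj, PySem.Str.toList_strip, PySem.Str.toList_join]
      exact pv_strip_fix _ hjg
    rw [htxt]
    have hkpos : 0 < k := by
      rcases Nat.eq_zero_or_pos k with h0 | h
      · exfalso; apply hout; rw [h0]; simp
      · exact h
    have hfits := pv_take_fits limit cleaned 0 (by rw [← hk]; exact hkpos)
    rw [← hk] at hfits
    rw [if_pos (by omega)]
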